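-- pv_equiv track=rewrite | github.com/pizzaisdavid/daily-python | python/3.3/solved/home_row_spell_check.py | create_possible_word
-- ===== SOURCE A (Python) =====
-- def create_possible_word(string, shift):
--     ROWS = ['qwertyuiop', 'asdfghjkl', 'zxcvbnm']
--     possible = ''
--     for character in string:
--         for row in ROWS:
--             try:
--                 index = find(row, character)
--                 letter = row[index - shift]
--                 possible += letter
--             except:
--                 pass
--     return possible
--
-- def find(sequence, locate):
--     for index, element in enumerate(sequence):
--         if element == locate:
--             return index
-- ===== SOURCE B (Python) =====
-- def create_possible_word(string, shift):
--     rows = ['qwertyuiop', 'asdfghjkl', 'zxcvbnm']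
--     table = {}
--     for row in rows:
--         n = len(row)
--         for i, c in enumerate(row):
--             k = i - shift
--             if -n <= k < n:
--                 table[c] = row[k % n]
--     return ''.join(table[c] for c in string if c in table)
-- ===== Notes on version B (the rewrite author's own statement) =====
-- stated objective: faster
-- what changed: B precomputes one dict mapping each keyboard character to its shifted letter (with an explicit range check instead of per-character exception swallowing) and then produces the result in a single lookup pass over the string, replacing A's per-character try/except scan of all three rows.
import Mathlib
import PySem

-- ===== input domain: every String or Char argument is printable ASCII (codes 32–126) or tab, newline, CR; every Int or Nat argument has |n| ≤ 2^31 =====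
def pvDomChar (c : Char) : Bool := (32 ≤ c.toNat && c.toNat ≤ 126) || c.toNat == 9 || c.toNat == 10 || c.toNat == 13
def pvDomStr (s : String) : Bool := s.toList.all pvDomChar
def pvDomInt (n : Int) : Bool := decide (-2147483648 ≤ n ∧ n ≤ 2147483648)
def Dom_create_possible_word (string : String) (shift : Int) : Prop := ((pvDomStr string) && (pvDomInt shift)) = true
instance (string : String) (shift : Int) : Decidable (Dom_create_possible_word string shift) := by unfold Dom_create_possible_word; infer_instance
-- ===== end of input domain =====

-- B replaces A's per-character scan over the three keyboard rows (with try/except per step) by a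
-- table of shifted letters built once, then a single lookup pass over the string (objective: faster).

-- ===== PORT A =====
-- the three keyboard rows, the shared ROWS constant of both Pythons
def pvROWS : List (List Char) :=
  [['q','w','e','r','t','y','u','i','o','p'],
   ['a','s','d','f','g','h','j','k','l'],
   ['z','x','c','v','b','n','m']]

-- Python `find`: a for-loop over enumerate with early return = find? on the enumerated list
def pvFind (sequence : List Char) (locate : Char) : Option Int :=
  ((PySem.List.enumerate sequence).find? (fun p => p.2 == locate)).map (·.1)

def create_possible_word (string : String) (shift : Int) : String :=
  String.ofList <| string.toList.foldl (fun possible character =>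
    pvROWS.foldl (fun possible row =>
      match pvFind row character with
      | none => possible      -- row[None - shift]: TypeError, swallowed by the bare `except`
      | some index =>
        match PySem.List.pyGet? row (index - shift) with
        | none => possible    -- IndexError, swallowed by the bare `except`
        | some letter => possible ++ [letter]) possible) []

-- ===== PORT B =====
def pvTable (shift : Int) : PySem.Dict Char Char :=
  pvROWS.foldl (fun table row =>
    (PySem.List.enumerate row).foldl (fun table p =>
      let k := p.1 - shift
      if -(row.length : Int) ≤ k ∧ k < (row.length : Int) then
        table.insert p.2 (row.getD (PySem.Int.mod k (row.length : Int)).toNat ' ')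
      else table) table) PySem.Dict.empty

def create_possible_word_alt (string : String) (shift : Int) : String :=
  String.ofList <| string.toList.filterMap (fun c => (pvTable shift).get? c)

-- ===== PRECONDITION & SPEC =====
def Spec_create_possible_word (string : String) (shift : Int) (out : String) : Prop := out = create_possible_word_alt string shift
instance (string : String) (shift : Int) (out : String) : Decidable (Spec_create_possible_word string shift out) := by unfold Spec_create_possible_word; infer_instance

-- ===== CLAIM (what is proved, stated in full; the proofs are below) =====
def Claim_equal_create_possible_word : Prop := ∀ (string : String) (shift : Int), Dom_create_possible_word string shift → Spec_create_possible_word string shift (create_possible_word string shift)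

-- ===== LEMMAS AND PROOFS =====

-- the optional shifted letter a single row contributes for character c
def pvOptRow (row : List Char) (c : Char) (shift : Int) : Option Char :=
  (pvFind row c).bind fun i => PySem.List.pyGet? row (i - shift)

-- a fold of conditional inserts leaves an untouched key alone
theorem pv_get?_foldl_notmem (cond : Int → Prop) [DecidablePred cond] (f : Int → Char)
    (ps : List (Int × Char)) (t : PySem.Dict Char Char) (c : Char)
    (h : c ∉ ps.map (·.2)) :
    ((ps.foldl (fun t p => if cond p.1 then t.insert p.2 (f p.1) else t) t).get? c) = t.get? c := by
  induction ps generalizing t with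
  | nil => rfl
  | cons p rest ih =>
    simp only [List.map_cons, List.mem_cons, not_or] at h
    simp only [List.foldl_cons]
    rw [ih _ h.2]
    split_ifs with hc
    · exact PySem.Dict.get?_insert_of_ne _ _ h.1
    · rfl

-- a fold of conditional inserts over distinct keys: lookup of a present key
theorem pv_get?_foldl_found (cond : Int → Prop) [DecidablePred cond] (f : Int → Char)
    (ps : List (Int × Char)) (t : PySem.Dict Char Char) (c : Char) (i : Int) (ch : Char)
    (hnd : (ps.map (·.2)).Nodup)
    (hf : ps.find? (fun p => p.2 == c) = some (i, ch)) :
    ((ps.foldl (fun t p => if cond p.1 then t.insert p.2 (f p.1) else t) t).get? c)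
      = if cond i then some (f i) else t.get? c := by
  induction ps generalizing t with
  | nil => simp at hf
  | cons p rest ih =>
    simp only [List.map_cons, List.nodup_cons] at hnd
    rw [List.find?_cons] at hf
    simp only [List.foldl_cons]
    split at hf
    · rename_i hbeq
      have hpc : p.2 = c := by simpa using hbeq
      injection hf with hf
      subst hf
      simp only at hpc hnd ⊢
      rw [pv_get?_foldl_notmem cond f rest _ c (hpc ▸ hnd.1)]
      split_ifs with hc
      · rw [← hpc]; exact PySem.Dict.get?_insert_self _ _ _
      · rfl
    · rename_i hbeq
      have hne : c ≠ p.2 := by simp at hbeq; exact fun h => hbeq h.symm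
      rw [ih _ hnd.2 hf]
      have hpre : (if cond p.1 then t.insert p.2 (f p.1) else t).get? c = t.get? c := by
        split_ifs with hc1
        · exact PySem.Dict.get?_insert_of_ne _ _ hne
        · rfl
      rw [hpre]

-- Python's xs[k] as a range test plus a modulus (the value B's table stores)
theorem pv_pyGet?_mod (xs : List Char) (k : Int) :
    PySem.List.pyGet? xs k =
      if -(xs.length : Int) ≤ k ∧ k < (xs.length : Int)
      then some (xs.getD (PySem.Int.mod k (xs.length : Int)).toNat ' ') else none := by
  split_ifs with h
  · have hn : 0 < xs.length := by omega
    rw [PySem.Int.mod_eq_emod_of_pos (by exact_mod_cast hn)]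
    by_cases hk : 0 ≤ k
    · have hmod : k % (xs.length : Int) = k := Int.emod_eq_of_lt hk h.2
      rw [hmod, PySem.List.pyGet?_eq_some_getElem xs hk h.2]
      rw [List.getD_eq_getElem _ _ (by omega)]
    · have hm1 : 0 < (-k).toNat := by omega
      have hm2 : (-k).toNat ≤ xs.length := by omega
      have hk' : k = -((-k).toNat : Int) := by omega
      rw [hk', PySem.List.pyGet?_neg_natCast xs _ hm1 hm2]
      have hmod : -(((-k).toNat : Int)) % (xs.length : Int) = (xs.length : Int) + k := by
        rw [← hk']
        calc k % (xs.length : Int) = (k + (xs.length : Int)) % (xs.length : Int) :=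
              Int.emod_eq_add_self_emod
          _ = k + (xs.length : Int) := Int.emod_eq_of_lt (by omega) (by omega)
          _ = (xs.length : Int) + k := by ring
      rw [hmod]
      have hlt : ((xs.length : Int) + k).toNat < xs.length := by omega
      have hidx : ((xs.length : Int) + k).toNat = xs.length - (-k).toNat := by omega
      rw [List.getElem?_eq_getElem (by omega), List.getD_eq_getElem _ _ hlt]
      exact congrArg some (getElem_congr rfl hidx.symm (by omega))
  · rw [PySem.List.pyGet?_eq_none_iff]
    simp [PySem.Raise.InRange]; omega

-- A's per-row step appends exactly the row's optional contribution
theorem pv_rowA (row : List Char) (c : Char) (shift : Int) (possible : List Char) :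
    (match pvFind row c with
     | none => possible
     | some index =>
       match PySem.List.pyGet? row (index - shift) with
       | none => possible
       | some letter => possible ++ [letter])
      = possible ++ (pvOptRow row c shift).toList := by
  unfold pvOptRow
  cases hf : pvFind row c with
  | none => simp
  | some i => cases hg : PySem.List.pyGet? row (i - shift) <;> simp [hg]

-- B's per-row table build: lookup is the row's contribution, else what was there before
theorem pv_rowB (row : List Char) (c : Char) (shift : Int) (t : PySem.Dict Char Char)
    (hnd : row.Nodup) :
    (((PySem.List.enumerate row).foldl (fun table p =>
        let k := p.1 - shift
        if -(row.length : Int) ≤ k ∧ k < (row.length : Int) then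
          table.insert p.2 (row.getD (PySem.Int.mod k (row.length : Int)).toNat ' ')
        else table) t).get? c)
      = (pvOptRow row c shift).or (t.get? c) := by
  have hnd' : ((PySem.List.enumerate row).map (·.2)).Nodup := by
    rw [PySem.List.map_snd_enumerate]; exact hnd
  cases hf : (PySem.List.enumerate row).find? (fun p => p.2 == c) with
  | none =>
    have hmem : c ∉ (PySem.List.enumerate row).map (·.2) := by
      intro hc
      rcases List.mem_map.mp hc with ⟨p, hp, hpc⟩
      have := List.find?_eq_none.mp hf p hp
      simp [hpc] at this
    rw [pv_get?_foldl_notmem (fun i => -(row.length : Int) ≤ i - shift ∧ i - shift < (row.length : Int))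
          (fun i => row.getD (PySem.Int.mod (i - shift) (row.length : Int)).toNat ' ') _ _ _ hmem]
    unfold pvOptRow pvFind
    rw [hf]
    rfl
  | some pr =>
    obtain ⟨i, ch⟩ := pr
    rw [pv_get?_foldl_found (fun i => -(row.length : Int) ≤ i - shift ∧ i - shift < (row.length : Int))
          (fun i => row.getD (PySem.Int.mod (i - shift) (row.length : Int)).toNat ' ') _ _ _ i ch hnd' hf]
    unfold pvOptRow pvFind
    rw [hf]
    simp only [Option.map_some, Option.bind_some]
    rw [pv_pyGet?_mod row (i - shift)]
    split_ifs with hc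
    · rfl
    · rfl

-- the rows by name, for the row-by-row reasoning below
def pvR1 : List Char := ['q','w','e','r','t','y','u','i','o','p']
def pvR2 : List Char := ['a','s','d','f','g','h','j','k','l']
def pvR3 : List Char := ['z','x','c','v','b','n','m']

theorem pvROWS_eq : pvROWS = [pvR1, pvR2, pvR3] := rfl

-- a character sits in at most one keyboard row
theorem pv_disj12 (c : Char) (h : c ∈ pvR1) : c ∉ pvR2 := by
  fin_cases h <;> decide

theorem pv_disj13 (c : Char) (h : c ∈ pvR1) : c ∉ pvR3 := by
  fin_cases h <;> decide

theorem pv_disj23 (c : Char) (h : c ∈ pvR2) : c ∉ pvR3 := by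
  fin_cases h <;> decide

theorem pv_optRow_of_not_mem (row : List Char) (c : Char) (shift : Int) (h : c ∉ row) :
    pvOptRow row c shift = none := by
  unfold pvOptRow pvFind
  have hf : (PySem.List.enumerate row).find? (fun p => p.2 == c) = none := by
    apply List.find?_eq_none.mpr
    intro p hp
    have : p.2 ∈ row := by
      rw [← PySem.List.map_snd_enumerate row 0]
      exact List.mem_map.mpr ⟨p, hp, rfl⟩
    simp only [beq_iff_eq]
    exact fun hpc => h (hpc ▸ this)
  rw [hf]; rfl

-- per character: A's scan over the three rows appends exactly B's table lookup
theorem pv_combine (c : Char) (shift : Int) (possible : List Char) :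
    (pvROWS.foldl (fun possible row =>
      match pvFind row c with
      | none => possible
      | some index =>
        match PySem.List.pyGet? row (index - shift) with
        | none => possible
        | some letter => possible ++ [letter]) possible)
      = possible ++ ((pvTable shift).get? c).toList := by
  rw [pvROWS_eq]
  simp only [List.foldl_cons, List.foldl_nil]
  rw [pv_rowA pvR1, pv_rowA pvR2, pv_rowA pvR3]
  have htab : (pvTable shift).get? c
      = (pvOptRow pvR3 c shift).or ((pvOptRow pvR2 c shift).or
          ((pvOptRow pvR1 c shift).or none)) := by
    unfold pvTable
    rw [pvROWS_eq]
    simp only [List.foldl_cons, List.foldl_nil]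
    rw [pv_rowB pvR3 c shift _ (by decide), pv_rowB pvR2 c shift _ (by decide),
        pv_rowB pvR1 c shift _ (by decide)]
    rw [PySem.Dict.get?_empty]
  rw [htab]
  have h1 := pv_optRow_of_not_mem pvR1 c shift
  have h2 := pv_optRow_of_not_mem pvR2 c shift
  have h3 := pv_optRow_of_not_mem pvR3 c shift
  by_cases hm1 : c ∈ pvR1
  · rw [h2 (pv_disj12 c hm1), h3 (pv_disj13 c hm1)]
    cases pvOptRow pvR1 c shift <;> simp
  · rw [h1 hm1]
    by_cases hm2 : c ∈ pvR2
    · rw [h3 (pv_disj23 c hm2)]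
      cases pvOptRow pvR2 c shift <;> simp
    · rw [h2 hm2]
      cases pvOptRow pvR3 c shift <;> simp

-- the whole string: fold-with-append is filterMap of the table lookup
theorem pv_fold_filterMap (shift : Int) :
    ∀ (l : List Char) (acc : List Char),
      (l.foldl (fun possible character =>
        pvROWS.foldl (fun possible row =>
          match pvFind row character with
          | none => possible
          | some index =>
            match PySem.List.pyGet? row (index - shift) with
            | none => possible
            | some letter => possible ++ [letter]) possible) acc)
        = acc ++ l.filterMap (fun c => (pvTable shift).get? c) := by
  intro l
  induction l with
  | nil => intro acc; simp
  | cons c l ih =>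
    intro acc
    simp only [List.foldl_cons]
    rw [ih, pv_combine c shift acc, List.filterMap_cons]
    cases (pvTable shift).get? c <;> simp

-- ===== VERDICT (by name: the statement is the Claim_ definition above) =====
theorem create_possible_word_spec : Claim_equal_create_possible_word := by
  intro string shift _
  unfold Spec_create_possible_word create_possible_word create_possible_word_alt
  rw [pv_fold_filterMap shift string.toList []]
  rfl
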